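-- pv_equiv track=rewrite | github.com/Goyatuzo/python-problems | code_forces/189/b/counting_rhombi.py | counting_rhombi
-- ===== SOURCE A (Python) =====
-- def counting_rhombi(w, h):
--     count = 0
--     larger = max(w, h)
--
--     for r in range(1, larger):
--         for x in range(w):
--             if x - r < 0 or x + r > w:
--                 continue
--
--             for y in range(h):
--                 if y - r < 0 or y + r > h:
--                     continue
--
--                 count += 1
--     return count
-- ===== SOURCE B (Python) =====
-- def counting_rhombi(w, h):
--     m = max(0, min(w // 2, h // 2))
--     a, b = w + 1, h + 1
--     t = m * (m + 1) // 2
--     s = m * (m + 1) * (2 * m + 1) // 6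
--     return m * a * b - 2 * (a + b) * t + 4 * s
-- ===== Notes on version B (the rewrite author's own statement) =====
-- stated objective: faster
-- what changed: Replaced the O(max(w,h)*w*h) triple loop by a closed-form polynomial: the count is sum_r (w-2r+1)(h-2r+1) over r=1..min(w//2,h//2), evaluated with Gauss/square-pyramid formulas in O(1).
import Mathlib
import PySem

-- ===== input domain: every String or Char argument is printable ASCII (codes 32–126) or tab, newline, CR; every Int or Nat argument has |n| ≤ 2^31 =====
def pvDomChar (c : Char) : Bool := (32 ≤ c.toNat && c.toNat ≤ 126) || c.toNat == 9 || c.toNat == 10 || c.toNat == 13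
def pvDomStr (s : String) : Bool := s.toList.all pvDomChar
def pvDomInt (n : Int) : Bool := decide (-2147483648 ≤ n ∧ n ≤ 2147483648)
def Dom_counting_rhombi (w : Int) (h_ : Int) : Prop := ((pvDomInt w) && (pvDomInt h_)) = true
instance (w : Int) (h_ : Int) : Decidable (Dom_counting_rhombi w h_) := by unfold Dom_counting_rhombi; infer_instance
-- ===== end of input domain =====

-- B replaces A's triple loop by a closed-form polynomial in m = min(w//2, h//2) (objective: faster, O(1)).

-- ===== PORT A =====
def counting_rhombi (w : Int) (h_ : Int) : Int :=
  (PySem.List.pyRange 1 (max w h_) 1).foldl (fun count r =>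
    (PySem.List.pyRange 0 w 1).foldl (fun count x =>
      if x - r < 0 ∨ x + r > w then count
      else
        (PySem.List.pyRange 0 h_ 1).foldl (fun count y =>
          if y - r < 0 ∨ y + r > h_ then count else count + 1) count) count) 0

-- ===== PORT B =====
def counting_rhombi_alt (w : Int) (h_ : Int) : Int :=
  let m := max 0 (min (PySem.Int.floordiv w 2) (PySem.Int.floordiv h_ 2))
  let a := w + 1
  let b := h_ + 1
  let t := PySem.Int.floordiv (m * (m + 1)) 2
  let s := PySem.Int.floordiv (m * (m + 1) * (2 * m + 1)) 6
  m * a * b - 2 * (a + b) * t + 4 * s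

-- ===== PRECONDITION & SPEC =====
def Spec_counting_rhombi (w : Int) (h_ : Int) (out : Int) : Prop := out = counting_rhombi_alt w h_
instance (w : Int) (h_ : Int) (out : Int) : Decidable (Spec_counting_rhombi w h_ out) := by unfold Spec_counting_rhombi; infer_instance

-- ===== CLAIM (what is proved, stated in full; the proofs are below) =====
def Claim_equal_counting_rhombi : Prop := ∀ (w : Int) (h_ : Int), Dom_counting_rhombi w h_ → Spec_counting_rhombi w h_ (counting_rhombi w h_)

-- ===== LEMMAS AND PROOFS =====

-- Σ_{r=1}^{k} max 0 (w-2r+1) * max 0 (h-2r+1), the common value of both ports.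
def gsum (w h_ : Int) : Nat → Int
  | 0 => 0
  | k+1 => gsum w h_ k + max 0 (w - 2*(k+1) + 1) * max 0 (h_ - 2*(k+1) + 1)

-- a fold over a segment where every element is skipped leaves the accumulator
theorem foldl_skip {P : Int → Prop} [DecidablePred P] (g : Int → Int → Int)
    (l : List Int) (hall : ∀ y ∈ l, P y) :
    ∀ c : Int, l.foldl (fun c y => if P y then c else g c y) c = c := by
  induction l with
  | nil => intro c; rfl
  | cons y l ih =>
    intro c
    simp only [List.foldl_cons, if_pos (hall y (List.mem_cons_self))]
    exact ih (fun z hz => hall z (List.mem_cons_of_mem _ hz)) c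

-- a fold over a segment where every element adds the constant K
theorem foldl_addK {P : Int → Prop} [DecidablePred P] (g : Int → Int → Int) (K : Int)
    (hg : ∀ c y, g c y = c + K) (l : List Int) (hall : ∀ y ∈ l, ¬ P y) :
    ∀ c : Int, l.foldl (fun c y => if P y then c else g c y) c = c + l.length * K := by
  induction l with
  | nil => intro c; simp
  | cons y l ih =>
    intro c
    rw [List.foldl_cons]
    have hstep : (if P y then c else g c y) = c + K := by
      rw [if_neg (hall y (List.mem_cons_self))]; exact hg c y
    rw [hstep, ih (fun z hz => hall z (List.mem_cons_of_mem _ hz))]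
    simp only [List.length_cons]
    push_cast
    ring

-- the inner y-loop adds exactly max 0 (h-2r+1)
theorem inner_loop (h_ r : Int) (hr : 1 ≤ r) (c : Int) :
    (PySem.List.pyRange 0 h_ 1).foldl (fun count y =>
      if y - r < 0 ∨ y + r > h_ then count else count + 1) c
      = c + max 0 (h_ - 2*r + 1) := by
  by_cases hcase : 2*r ≤ h_ + 1
  · have h1 : (0:Int) ≤ r := by omega
    have h2 : r ≤ h_ - r + 1 := by omega
    have h3 : h_ - r + 1 ≤ h_ := by omega
    rw [PySem.List.pyRange_one_append 0 r h_ h1 (by omega),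
        PySem.List.pyRange_one_append r (h_ - r + 1) h_ h2 h3,
        List.foldl_append, List.foldl_append]
    rw [foldl_skip (P := fun y => y - r < 0 ∨ y + r > h_) _ _
        (fun y hy => by rw [PySem.List.mem_pyRange_one] at hy; right; omega)]
    rw [foldl_addK (P := fun y => y - r < 0 ∨ y + r > h_) _ 1 (fun c y => rfl) _
        (fun y hy => by rw [PySem.List.mem_pyRange_one] at hy; omega)]
    rw [foldl_skip (P := fun y => y - r < 0 ∨ y + r > h_) _ _
        (fun y hy => by rw [PySem.List.mem_pyRange_one] at hy; left; omega)]
    rw [PySem.List.length_pyRange_one]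
    have : ((h_ - r + 1 - r).toNat : Int) = h_ - 2*r + 1 := by omega
    rw [this]; omega
  · rw [foldl_skip (P := fun y => y - r < 0 ∨ y + r > h_) _ _
        (fun y hy => by rw [PySem.List.mem_pyRange_one] at hy; omega)]
    omega

-- the middle x-loop adds exactly max 0 (w-2r+1) * max 0 (h-2r+1)
theorem middle_loop (w h_ r : Int) (hr : 1 ≤ r) (c : Int) :
    (PySem.List.pyRange 0 w 1).foldl (fun count x =>
      if x - r < 0 ∨ x + r > w then count
      else
        (PySem.List.pyRange 0 h_ 1).foldl (fun count y =>
          if y - r < 0 ∨ y + r > h_ then count else count + 1) count) c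
      = c + max 0 (w - 2*r + 1) * max 0 (h_ - 2*r + 1) := by
  by_cases hcase : 2*r ≤ w + 1
  · have h1 : (0:Int) ≤ r := by omega
    have h2 : r ≤ w - r + 1 := by omega
    have h3 : w - r + 1 ≤ w := by omega
    rw [PySem.List.pyRange_one_append 0 r w h1 (by omega),
        PySem.List.pyRange_one_append r (w - r + 1) w h2 h3,
        List.foldl_append, List.foldl_append]
    rw [foldl_skip (P := fun x => x - r < 0 ∨ x + r > w) _ _
        (fun x hx => by rw [PySem.List.mem_pyRange_one] at hx; right; omega)]
    rw [foldl_addK (P := fun x => x - r < 0 ∨ x + r > w) _ (max 0 (h_ - 2*r + 1))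
        (fun c x => inner_loop h_ r hr c) _
        (fun x hx => by rw [PySem.List.mem_pyRange_one] at hx; omega)]
    rw [foldl_skip (P := fun x => x - r < 0 ∨ x + r > w) _ _
        (fun x hx => by rw [PySem.List.mem_pyRange_one] at hx; left; omega)]
    rw [PySem.List.length_pyRange_one]
    have hmax : max 0 (w - 2*r + 1) = ((w - r + 1 - r).toNat : Int) := by omega
    rw [hmax]
  · rw [foldl_skip (P := fun x => x - r < 0 ∨ x + r > w) _ _
        (fun x hx => by rw [PySem.List.mem_pyRange_one] at hx; omega)]
    have : max 0 (w - 2*r + 1) = 0 := by omega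
    rw [this, zero_mul, add_zero]

-- the outer loop computes gsum
theorem outer_loop (w h_ : Int) (n : Nat) (c : Int) :
    (PySem.List.pyRange 1 (1 + (n:Int)) 1).foldl (fun count r =>
      (PySem.List.pyRange 0 w 1).foldl (fun count x =>
        if x - r < 0 ∨ x + r > w then count
        else
          (PySem.List.pyRange 0 h_ 1).foldl (fun count y =>
            if y - r < 0 ∨ y + r > h_ then count else count + 1) count) count) c
      = c + gsum w h_ n := by
  induction n generalizing c with
  | zero =>
    rw [PySem.List.pyRange_one_eq_nil (a := 1) (b := 1 + ((0:Nat):Int)) (by norm_num)]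
    simp [gsum]
  | succ n ih =>
    have : (1:Int) + (n+1 : Nat) = (1 + (n:Int)) + 1 := by push_cast; ring
    rw [this, PySem.List.pyRange_one_succ_right (by omega), List.foldl_append, ih]
    simp only [List.foldl_cons, List.foldl_nil]
    rw [middle_loop w h_ (1 + (n:Int)) (by omega)]
    show _ = c + gsum w h_ (n+1)
    simp only [gsum]
    have e1 : w - 2*(1 + (n:Int)) + 1 = w - 2*((n:Nat)+1 : Int) + 1 := by ring
    have e2 : h_ - 2*(1 + (n:Int)) + 1 = h_ - 2*((n:Nat)+1 : Int) + 1 := by ring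
    rw [e1, e2]
    ring

-- A computes gsum up to max w h - 1
theorem a_eq_gsum (w h_ : Int) :
    counting_rhombi w h_ = gsum w h_ (max w h_ - 1).toNat := by
  unfold counting_rhombi
  set n := (max w h_ - 1).toNat with hn
  by_cases hle : max w h_ ≤ 1
  · rw [PySem.List.pyRange_one_eq_nil hle]
    have h0 : n = 0 := by omega
    rw [h0]; rfl
  · have hmx : max w h_ = 1 + (n : Int) := by omega
    rw [hmx, outer_loop, zero_add]

-- beyond m = max 0 (min (w//2) (h//2)) every summand of gsum vanishes
theorem gsum_stable (w h_ : Int) (mN : Nat)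
    (hvan : ∀ k : Nat, mN ≤ k → max 0 (w - 2*((k:Int)+1) + 1) * max 0 (h_ - 2*((k:Int)+1) + 1) = 0) :
    ∀ n : Nat, mN ≤ n → gsum w h_ n = gsum w h_ mN := by
  intro n
  induction n with
  | zero =>
    intro hn
    have h0 : mN = 0 := by omega
    rw [h0]
  | succ n ih =>
    intro hn
    by_cases h : mN ≤ n
    · simp only [gsum]
      rw [ih h]
      have hv := hvan n h
      push_cast at hv
      omega
    · have h1 : mN = n + 1 := by omega
      rw [h1]

-- closed-form for gsum while all summands are nonnegative: 3·gsum k = 3k·a·b − 3(a+b)·k(k+1) + 2·k(k+1)(2k+1)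
theorem gsum_closed (w h_ : Int) (k : Nat)
    (hpos : ∀ r : Int, 1 ≤ r → r ≤ (k:Int) → 0 ≤ w - 2*r + 1 ∧ 0 ≤ h_ - 2*r + 1) :
    3 * gsum w h_ k
      = 3*(k:Int)*(w+1)*(h_+1) - 3*((w+1)+(h_+1))*((k:Int)*((k:Int)+1))
        + 2*((k:Int)*((k:Int)+1)*(2*(k:Int)+1)) := by
  induction k with
  | zero => simp [gsum]
  | succ k ih =>
    simp only [gsum]
    have hk : ∀ r : Int, 1 ≤ r → r ≤ (k:Int) → 0 ≤ w - 2*r + 1 ∧ 0 ≤ h_ - 2*r + 1 := by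
      intro r h1 h2; exact hpos r h1 (by omega)
    have hlast := hpos ((k:Int)+1) (by omega) (by omega)
    have e1 : max 0 (w - 2*((k:Nat)+1 : Int) + 1) = w - 2*((k:Int)+1) + 1 := by
      omega
    have e2 : max 0 (h_ - 2*((k:Nat)+1 : Int) + 1) = h_ - 2*((k:Int)+1) + 1 := by
      omega
    rw [mul_add, e1, e2, ih hk]
    push_cast
    ring

theorem six_dvd_sq_pyramid (n : Int) : (6:Int) ∣ n*(n+1)*(2*n+1) := by
  apply (ZMod.intCast_zmod_eq_zero_iff_dvd (n*(n+1)*(2*n+1)) 6).mp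
  push_cast
  exact (by decide : ∀ z : ZMod 6, z*(z+1)*(2*z+1) = 0) (n : ZMod 6)

theorem two_dvd_tri (n : Int) : (2:Int) ∣ n*(n+1) := by
  apply (ZMod.intCast_zmod_eq_zero_iff_dvd (n*(n+1)) 2).mp
  push_cast
  exact (by decide : ∀ z : ZMod 2, z*(z+1) = 0) (n : ZMod 2)

theorem floordiv_exact (a b : Int) (hdvd : b ∣ a) :
    PySem.Int.floordiv a b * b = a := by
  have h := PySem.Int.floordiv_mul_add_mod a b
  have h0 : PySem.Int.mod a b = 0 := (PySem.Int.mod_eq_zero_iff_dvd a b).mpr hdvd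
  omega

-- B equals gsum at m.toNat
theorem b_eq_gsum (w h_ : Int) :
    counting_rhombi_alt w h_
      = gsum w h_ (max 0 (min (PySem.Int.floordiv w 2) (PySem.Int.floordiv h_ 2))).toNat := by
  unfold counting_rhombi_alt
  set m : Int := max 0 (min (PySem.Int.floordiv w 2) (PySem.Int.floordiv h_ 2)) with hm
  show m * (w + 1) * (h_ + 1)
      - 2 * ((w + 1) + (h_ + 1)) * PySem.Int.floordiv (m * (m + 1)) 2
      + 4 * PySem.Int.floordiv (m * (m + 1) * (2 * m + 1)) 6
      = gsum w h_ m.toNat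
  have hw2 := PySem.Int.floordiv_mul_add_mod w 2
  have hw2m := PySem.Int.mod_nonneg w (by omega : (0:Int) < 2)
  have hw2l := PySem.Int.mod_lt w (by omega : (0:Int) < 2)
  have hh2 := PySem.Int.floordiv_mul_add_mod h_ 2
  have hh2m := PySem.Int.mod_nonneg h_ (by omega : (0:Int) < 2)
  have hh2l := PySem.Int.mod_lt h_ (by omega : (0:Int) < 2)
  have hm0 : 0 ≤ m := by omega
  have hmk : ((m.toNat : Int)) = m := by omega
  have ht := floordiv_exact (m*(m+1)) 2 (two_dvd_tri m)
  have hs := floordiv_exact (m*(m+1)*(2*m+1)) 6 (six_dvd_sq_pyramid m)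
  have hcl := gsum_closed w h_ m.toNat (by
    intro r h1 h2
    rw [hmk] at h2
    constructor <;> omega)
  rw [hmk] at hcl
  -- 3·B = 3·gsum, cancel 3
  have h3 : 3 * (m * (w+1) * (h_+1) - 2 * ((w+1)+(h_+1)) * PySem.Int.floordiv (m*(m+1)) 2
          + 4 * PySem.Int.floordiv (m*(m+1)*(2*m+1)) 6) = 3 * gsum w h_ m.toNat := by
    rw [hcl]
    linear_combination (-3*((w+1)+(h_+1))) * ht + 2 * hs
  omega

-- ===== VERDICT (by name: the statement is the Claim_ definition above) =====
theorem counting_rhombi_spec : Claim_equal_counting_rhombi := by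
  intro w h_ _
  unfold Spec_counting_rhombi
  rw [a_eq_gsum, b_eq_gsum]
  set m : Int := max 0 (min (PySem.Int.floordiv w 2) (PySem.Int.floordiv h_ 2)) with hm
  have hw2 := PySem.Int.floordiv_mul_add_mod w 2
  have hw2m := PySem.Int.mod_nonneg w (by omega : (0:Int) < 2)
  have hw2l := PySem.Int.mod_lt w (by omega : (0:Int) < 2)
  have hh2 := PySem.Int.floordiv_mul_add_mod h_ 2
  have hh2m := PySem.Int.mod_nonneg h_ (by omega : (0:Int) < 2)
  have hh2l := PySem.Int.mod_lt h_ (by omega : (0:Int) < 2)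
  have hvan : ∀ k : Nat, m.toNat ≤ k →
      max 0 (w - 2*((k:Int)+1) + 1) * max 0 (h_ - 2*((k:Int)+1) + 1) = 0 := by
    intro k hk
    have hk' : m ≤ (k:Int) := by omega
    rcases le_total (PySem.Int.floordiv w 2) (PySem.Int.floordiv h_ 2) with hmin | hmin
    · have : max 0 (w - 2*((k:Int)+1) + 1) = 0 := by omega
      rw [this, zero_mul]
    · have : max 0 (h_ - 2*((k:Int)+1) + 1) = 0 := by omega
      rw [this, mul_zero]
  exact gsum_stable w h_ m.toNat hvan (max w h_ - 1).toNat (by omega)
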